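-- pv_equiv track=rewrite | github.com/richgumy/electromech-stretcher | legacy/data_relaxation_fitting.py | split_ramp_data
-- ===== SOURCE A (Python) =====
-- def split_ramp_data(data):
--     """
--     DESCR: Returns an array of indices showing where all of strain rates reach zero
--     EG for below ramp returns [3,5,9,11]
--                       ...
--                     /|
--                 ...  |
--               /|   | |
--     data->...  |   | |
--              | |   | |
--     indx->---3-5---9-11--
--     IN_PARAMS: Ramp profile data
--     NOTES:
--     TODO:
--     """
--     index_splits = [0]
--     n = len(data)
--     for i in range(1,n-1):
--         if (data[i-1] != data[i] and data[i] == data[i+1]) or (data[i-1] == data[i] and data[i] != data[i+1]):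
--             index_splits.append(i)
--     index_splits.append(n-1)
--     return index_splits
-- ===== SOURCE B (Python) =====
-- def split_ramp_data(data):
--     # table of adjacent changes
--     chg = [x != y for x, y in zip(data, data[1:])]
--     # run-length encode chg (groupby by hand)
--     runs = []
--     for c in chg:
--         if runs and runs[-1][0] == c:
--             runs[-1][1] += 1
--         else:
--             runs.append([c, 1])
--     # cumulative run boundaries; the final one (== len(data)-1) is dropped
--     bounds = []
--     acc = 0
--     for _, length in runs:
--         acc += length
--         bounds.append(acc)
--     return [0] + bounds[:-1] + [len(data) - 1]
-- ===== Notes on version B (the rewrite author's own statement) =====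
-- stated objective: alternative
-- what changed: A scans indices 1..n-2 testing a three-element window condition; B builds the adjacent-change boolean table with zip, run-length encodes it (hand groupby), and returns the cumulative run boundaries (minus the last) wrapped between the forced leading index 0 and trailing index n-1.
import Mathlib
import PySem

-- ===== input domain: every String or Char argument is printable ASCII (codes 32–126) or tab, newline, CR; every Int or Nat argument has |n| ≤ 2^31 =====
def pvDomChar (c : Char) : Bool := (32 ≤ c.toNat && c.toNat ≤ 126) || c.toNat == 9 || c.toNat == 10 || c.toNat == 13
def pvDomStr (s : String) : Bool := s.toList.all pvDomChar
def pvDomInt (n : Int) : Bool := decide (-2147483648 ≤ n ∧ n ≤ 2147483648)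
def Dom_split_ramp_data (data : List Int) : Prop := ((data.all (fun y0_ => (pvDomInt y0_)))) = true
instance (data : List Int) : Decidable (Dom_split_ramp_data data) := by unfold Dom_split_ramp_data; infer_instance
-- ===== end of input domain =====

-- B replaces A's three-element-window index scan by a pairwise-change table that is
-- run-length encoded, the split indices being the cumulative run boundaries (objective: alternative).


-- ===== PORT A =====
def split_ramp_data (data : List Int) : List Int :=
  let n : Int := data.length
  let index_splits : List Int :=
    (PySem.List.pyRange 1 (n - 1) 1).foldl (fun acc i =>
      if (PySem.List.pyGetD data (i - 1) 0 ≠ PySem.List.pyGetD data i 0 ∧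
          PySem.List.pyGetD data i 0 = PySem.List.pyGetD data (i + 1) 0) ∨
         (PySem.List.pyGetD data (i - 1) 0 = PySem.List.pyGetD data i 0 ∧
          PySem.List.pyGetD data i 0 ≠ PySem.List.pyGetD data (i + 1) 0)
      then acc ++ [i] else acc) [0]
  index_splits ++ [n - 1]

-- ===== PORT B =====
-- one step of Source B's run-length loop: extend the last run or open a new one
def rleStep (runs : List (Bool × Int)) (c : Bool) : List (Bool × Int) :=
  match runs.getLast? with
  | some (b, k) => if b = c then runs.dropLast ++ [(b, k + 1)] else runs ++ [(c, 1)]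
  | none => runs ++ [(c, 1)]

def split_ramp_data_alt (data : List Int) : List Int :=
  let chg : List Bool :=
    (data.zip (PySem.List.slice data (some 1) none)).map (fun p => decide (p.1 ≠ p.2))
  let runs : List (Bool × Int) := chg.foldl rleStep []
  let bounds : List Int :=
    (runs.foldl (fun (st : Int × List Int) r => (st.1 + r.2, st.2 ++ [st.1 + r.2])) (0, [])).2
  [0] ++ PySem.List.slice bounds none (some (-1)) ++ [(data.length : Int) - 1]

-- ===== PRECONDITION & SPEC =====
def Spec_split_ramp_data (data : List Int) (out : List Int) : Prop := out = split_ramp_data_alt data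
instance (data : List Int) (out : List Int) : Decidable (Spec_split_ramp_data data out) := by unfold Spec_split_ramp_data; infer_instance

-- ===== CLAIM (what is proved, stated in full; the proofs are below) =====
def Claim_equal_split_ramp_data : Prop := ∀ (data : List Int), Dom_split_ramp_data data → Spec_split_ramp_data data (split_ramp_data data)

-- ===== LEMMAS AND PROOFS =====

-- reference forms used only by the proofs
def chgOf : List Int → List Bool
  | a :: b :: rest => decide (a ≠ b) :: chgOf (b :: rest)
  | _ => []

def rle1 (b : Bool) (k : Int) : List Bool → List (Bool × Int)
  | [] => [(b, k)]
  | c :: cs => if b = c then rle1 b (k + 1) cs else (b, k) :: rle1 c 1 cs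

def csums (a : Int) : List (Bool × Int) → List Int
  | [] => []
  | r :: rs => (a + r.2) :: csums (a + r.2) rs

def flips (prev : Bool) (pos : Int) : List Bool → List Int
  | [] => []
  | c :: cs => (if c = prev then [] else [pos]) ++ flips c (pos + 1) cs

def win : List Int → Int → List Int
  | a :: b :: c :: rest, i =>
      (if (a ≠ b ∧ b = c) ∨ (a = b ∧ b ≠ c) then [i] else []) ++ win (b :: c :: rest) (i + 1)
  | _, _ => []

lemma chgOf_eq (data : List Int) :
    (data.zip (PySem.List.slice data (some 1) none)).map (fun p => decide (p.1 ≠ p.2)) = chgOf data := by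
  rw [PySem.List.slice_from_one]
  induction data with
  | nil => simp [chgOf]
  | cons a t ih =>
    cases t with
    | nil => simp [chgOf]
    | cons b r => simp [chgOf, ← ih]

lemma foldl_rleStep (l : List Bool) : ∀ (rs : List (Bool × Int)) (b : Bool) (k : Int),
    l.foldl rleStep (rs ++ [(b, k)]) = rs ++ rle1 b k l := by
  induction l with
  | nil => intro rs b k; simp [rle1]
  | cons c cs ih =>
    intro rs b k
    simp only [List.foldl_cons, rleStep, List.getLast?_concat, List.dropLast_concat, rle1]
    by_cases h : b = c
    · simp [h, ih]
    · rw [if_neg h, ih (rs ++ [(b, k)])]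
      simp [h]

lemma rle1_ne_nil (l : List Bool) : ∀ b k, rle1 b k l ≠ [] := by
  induction l with
  | nil => intro b k; simp [rle1]
  | cons c cs ih =>
    intro b k
    by_cases h : b = c <;> simp [rle1, h, ih]

lemma csums_ne_nil (a : Int) (l : List (Bool × Int)) (h : l ≠ []) : csums a l ≠ [] := by
  cases l with
  | nil => exact absurd rfl h
  | cons r rs => simp [csums]

lemma foldl_bounds (l : List (Bool × Int)) : ∀ (a : Int) (bs : List Int),
    (l.foldl (fun (st : Int × List Int) r => (st.1 + r.2, st.2 ++ [st.1 + r.2])) (a, bs)).2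
      = bs ++ csums a l := by
  induction l with
  | nil => intro a bs; simp [csums]
  | cons r rs ih => intro a bs; simp [csums, ih]

lemma csums_rle1 (l : List Bool) : ∀ (b : Bool) (k a : Int),
    (csums a (rle1 b k l)).dropLast = flips b (a + k) l := by
  induction l with
  | nil => intro b k a; simp [rle1, csums, flips]
  | cons c cs ih =>
    intro b k a
    by_cases h : b = c
    · subst h
      have e1 : rle1 b k (b :: cs) = rle1 b (k + 1) cs := by simp [rle1]
      rw [e1, ih]
      simp [flips, add_assoc]
    · have e1 : rle1 b k (c :: cs) = (b, k) :: rle1 c 1 cs := by simp [rle1, h]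
      rw [e1, csums, List.dropLast_cons_of_ne_nil (csums_ne_nil _ _ (rle1_ne_nil _ _ _)), ih]
      simp [flips, Ne.symm h, add_assoc]

lemma flips_eq_win : ∀ (rest : List Int) (a b : Int) (i : Int),
    flips (decide (a ≠ b)) i (chgOf (b :: rest)) = win (a :: b :: rest) i := by
  intro rest
  induction rest with
  | nil => intro a b i; simp [chgOf, flips, win]
  | cons c rs ih =>
    intro a b i
    simp only [chgOf, flips, win, ← ih]
    congr 1
    by_cases hab : a = b <;> by_cases hbc : b = c <;> simp [hab, hbc]

lemma filter_cond_eq_win (data : List Int) : ∀ (suf : List Int) (i : Int), 1 ≤ i →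
    data.drop (i.toNat - 1) = suf →
    (PySem.List.pyRange i ((data.length : Int) - 1) 1).filter (fun j =>
      decide ((PySem.List.pyGetD data (j - 1) 0 ≠ PySem.List.pyGetD data j 0 ∧
          PySem.List.pyGetD data j 0 = PySem.List.pyGetD data (j + 1) 0) ∨
         (PySem.List.pyGetD data (j - 1) 0 = PySem.List.pyGetD data j 0 ∧
          PySem.List.pyGetD data j 0 ≠ PySem.List.pyGetD data (j + 1) 0))) = win suf i := by
  intro suf
  induction suf with
  | nil =>
    intro i hi hdrop
    have hlen : data.length - (i.toNat - 1) = 0 := by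
      have := congrArg List.length hdrop; simpa using this
    rw [PySem.List.pyRange_one_eq_nil (by omega)]; simp [win]
  | cons a t ih =>
    intro i hi hdrop
    cases t with
    | nil =>
      have hlen : data.length - (i.toNat - 1) = 1 := by
        have := congrArg List.length hdrop; simpa using this
      rw [PySem.List.pyRange_one_eq_nil (by omega)]; simp [win]
    | cons b t2 =>
      cases t2 with
      | nil =>
        have hlen : data.length - (i.toNat - 1) = 2 := by
          have := congrArg List.length hdrop; simpa using this
        rw [PySem.List.pyRange_one_eq_nil (by omega)]; simp [win]
      | cons c rest =>
        have hlen : data.length - (i.toNat - 1) = rest.length + 3 := by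
          have := congrArg List.length hdrop; simp at this; omega
        have hi1 : i < (data.length : Int) - 1 := by omega
        have h0 : data[(i - 1).toNat]? = some a := by
          have : (data.drop (i.toNat - 1))[0]? = some a := by rw [hdrop]; rfl
          rw [List.getElem?_drop] at this
          rw [show (i - 1).toNat = i.toNat - 1 + 0 by omega]; exact this
        have h1 : data[i.toNat]? = some b := by
          have : (data.drop (i.toNat - 1))[1]? = some b := by rw [hdrop]; rfl
          rw [List.getElem?_drop] at this
          rw [show i.toNat = i.toNat - 1 + 1 by omega]; exact this
        have h2 : data[(i + 1).toNat]? = some c := by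
          have : (data.drop (i.toNat - 1))[2]? = some c := by rw [hdrop]; rfl
          rw [List.getElem?_drop] at this
          rw [show (i + 1).toNat = i.toNat - 1 + 2 by omega]; exact this
        have ha : PySem.List.pyGetD data (i - 1) 0 = a := by
          rw [PySem.List.pyGetD_eq_getElem data 0 (by omega) (by omega)]
          exact (List.getElem?_eq_some_iff.mp h0).2
        have hb : PySem.List.pyGetD data i 0 = b := by
          rw [PySem.List.pyGetD_eq_getElem data 0 (by omega) (by omega)]
          exact (List.getElem?_eq_some_iff.mp h1).2
        have hc : PySem.List.pyGetD data (i + 1) 0 = c := by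
          rw [PySem.List.pyGetD_eq_getElem data 0 (by omega) (by omega)]
          exact (List.getElem?_eq_some_iff.mp h2).2
        rw [PySem.List.pyRange_one_cons hi1, List.filter_cons]
        have hstep : data.drop ((i + 1).toNat - 1) = b :: c :: rest := by
          have : (data.drop (i.toNat - 1)).drop 1 = b :: c :: rest := by rw [hdrop]; rfl
          rw [List.drop_drop] at this
          rw [show (i + 1).toNat - 1 = i.toNat - 1 + 1 by omega]; exact this
        rw [show win (a :: b :: c :: rest) i
              = (if (a ≠ b ∧ b = c) ∨ (a = b ∧ b ≠ c) then [i] else []) ++ win (b :: c :: rest) (i + 1)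
            from rfl]
        rw [← ih (i + 1) (by omega) hstep]
        simp only [ha, hb, hc]
        by_cases hcond : (a ≠ b ∧ b = c) ∨ (a = b ∧ b ≠ c) <;> simp [hcond]

-- ===== VERDICT (by name: the statement is the Claim_ definition above) =====
theorem split_ramp_data_spec : Claim_equal_split_ramp_data := by
  intro data _
  unfold Spec_split_ramp_data split_ramp_data split_ramp_data_alt
  simp only [chgOf_eq, PySem.List.foldl_append_ite_eq_filter, PySem.List.slice_to_neg_one]
  rw [filter_cond_eq_win data data 1 (by omega) (by simp)]
  cases data with
  | nil => simp [chgOf, win]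
  | cons a t =>
    cases t with
    | nil => simp [chgOf, win]
    | cons b rest =>
      have hstep0 : rleStep [] (decide (a ≠ b)) = [] ++ [(decide (a ≠ b), 1)] := rfl
      rw [show chgOf (a :: b :: rest) = decide (a ≠ b) :: chgOf (b :: rest) from rfl]
      rw [List.foldl_cons, hstep0, foldl_rleStep, List.nil_append, foldl_bounds, List.nil_append,
        csums_rle1, show (0 : Int) + 1 = 1 from rfl, flips_eq_win]
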